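-- pv_equiv track=rewrite | github.com/diego-joubert/Python-Practices | programacion_competitiva/Robot desobediente.py | ejecutar
-- ===== SOURCE A (Python) =====
-- def ejecutar(s):
--     x, y, comandos = 0, 0, 0
--     for i in range(len(s)):
--         if s[i] == 'U':
--             y += 1
--         elif s[i] == 'D':
--             y -= 1
--         elif s[i] == 'L':
--             x -= 1
--         elif s[i] == 'R':
--             x += 1
--         if x == 0 and y == 0:
--            comandos = i+1
--     return comandos
-- ===== SOURCE B (Python) =====
-- def _delta(c):
--     if c == 'U':
--         return (0, 1)
--     if c == 'D':
--         return (0, -1)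
--     if c == 'L':
--         return (-1, 0)
--     if c == 'R':
--         return (1, 0)
--     return (0, 0)
--
--
-- def ejecutar(s):
--     # total displacement of the whole string first
--     x = y = 0
--     for c in s:
--         dx, dy = _delta(c)
--         x += dx
--         y += dy
--     # peel characters off the end; the first prefix length at the origin is the answer
--     for i in range(len(s), 0, -1):
--         if x == 0 and y == 0:
--             return i
--         dx, dy = _delta(s[i - 1])
--         x -= dx
--         y -= dy
--     return 0
-- ===== Notes on version B (the rewrite author's own statement) =====
-- stated objective: alternative
-- what changed: B first accumulates the total displacement in one pass, then scans prefix lengths from len(s) down to 1, subtracting each trailing character's delta, and returns the first (i.e. largest) prefix length at the origin, instead of A's forward scan recording the last origin hit.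
import Mathlib
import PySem

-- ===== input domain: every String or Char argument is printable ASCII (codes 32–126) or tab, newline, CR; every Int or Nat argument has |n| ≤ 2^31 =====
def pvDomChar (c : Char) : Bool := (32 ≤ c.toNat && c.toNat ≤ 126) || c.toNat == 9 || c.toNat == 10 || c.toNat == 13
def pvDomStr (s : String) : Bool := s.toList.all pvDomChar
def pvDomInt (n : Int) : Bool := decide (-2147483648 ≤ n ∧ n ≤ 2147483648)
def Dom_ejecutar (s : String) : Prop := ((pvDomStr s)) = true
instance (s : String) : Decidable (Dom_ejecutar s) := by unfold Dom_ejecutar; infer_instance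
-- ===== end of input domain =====

-- B computes the total displacement once, then scans prefix lengths from the end,
-- returning the largest prefix that sits at the origin (alternative decomposition, same cost).


-- ===== PORT A =====
-- A's for-loop over range(len(s)) with s[i], state (x, y, comandos), index counter i.
def loopA : List Char → Nat → Int → Int → Int → Int
  | [], _, _, _, com => com
  | c :: rest, i, x, y, com =>
    let y' := if c = 'U' then y + 1 else if c = 'D' then y - 1 else y
    let x' := if c = 'L' then x - 1 else if c = 'R' then x + 1 else x
    let com' := if x' = 0 ∧ y' = 0 then ((i : Int) + 1) else com
    loopA rest (i + 1) x' y' com'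

def ejecutar (s : String) : Int := loopA s.toList 0 0 0 0

-- ===== PORT B =====
-- port of Source B's _delta
def delta (c : Char) : Int × Int :=
  if c = 'U' then (0, 1)
  else if c = 'D' then (0, -1)
  else if c = 'L' then (-1, 0)
  else if c = 'R' then (1, 0)
  else (0, 0)

-- Source B's second loop: i runs from len(s) down to 1; the argument list is the
-- first i characters of s reversed, so its head is s[i-1] and its length is i.
def goB : List Char → Int → Int → Int
  | [], _, _ => 0
  | c :: rest, x, y =>
    if x = 0 ∧ y = 0 then ((rest.length : Int) + 1)
    else goB rest (x - (delta c).1) (y - (delta c).2)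

def ejecutar_alt (s : String) : Int :=
  let t := s.toList
  let p := t.foldl (fun (p : Int × Int) c => (p.1 + (delta c).1, p.2 + (delta c).2)) ((0 : Int), (0 : Int))
  goB t.reverse p.1 p.2

-- ===== PRECONDITION & SPEC =====
def Spec_ejecutar (s : String) (out : Int) : Prop := out = ejecutar_alt s
instance (s : String) (out : Int) : Decidable (Spec_ejecutar s out) := by unfold Spec_ejecutar; infer_instance

-- ===== CLAIM (what is proved, stated in full; the proofs are below) =====
def Claim_equal_ejecutar : Prop := ∀ (s : String), Dom_ejecutar s → Spec_ejecutar s (ejecutar s)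

-- ===== LEMMAS AND PROOFS =====

-- running position after a list of commands, started at p
def run (p : Int × Int) (l : List Char) : Int × Int :=
  l.foldl (fun (p : Int × Int) c => (p.1 + (delta c).1, p.2 + (delta c).2)) p

-- index (1-based, offset by k) of the last prefix of l whose running position
-- (started at p) is the origin
def lh : List Char → Int × Int → Nat → Option Nat
  | [], _, _ => none
  | c :: r, p, k =>
    let p' := (p.1 + (delta c).1, p.2 + (delta c).2)
    match lh r p' (k + 1) with
    | some m => some m
    | none => if p' = (0, 0) then some (k + 1) else none

theorem step_eq (c : Char) (x y : Int) :
    ((if c = 'L' then x - 1 else if c = 'R' then x + 1 else x),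
     (if c = 'U' then y + 1 else if c = 'D' then y - 1 else y))
    = (x + (delta c).1, y + (delta c).2) := by
  unfold delta
  by_cases h1 : c = 'U' <;> by_cases h2 : c = 'D' <;> by_cases h3 : c = 'L' <;>
    by_cases h4 : c = 'R' <;> simp_all <;> omega

theorem loopA_lh : ∀ (l : List Char) (i : Nat) (x y com : Int),
    loopA l i x y com =
      (match lh l (x, y) i with | some m => (m : Int) | none => com) := by
  intro l
  induction l with
  | nil => intro i x y com; simp [loopA, lh]
  | cons c r ih =>
    intro i x y com
    have hx : (if c = 'L' then x - 1 else if c = 'R' then x + 1 else x) = x + (delta c).1 :=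
      congrArg Prod.fst (step_eq c x y)
    have hy : (if c = 'U' then y + 1 else if c = 'D' then y - 1 else y) = y + (delta c).2 :=
      congrArg Prod.snd (step_eq c x y)
    show loopA (c :: r) i x y com = _
    rw [loopA, hx, hy]
    rw [ih]
    rw [lh]
    cases hm : lh r (x + (delta c).1, y + (delta c).2) (i + 1) with
    | some m => simp
    | none =>
      simp only []
      by_cases h0 : (x + (delta c).1, y + (delta c).2) = ((0 : Int), (0 : Int))
      · have h1 : x + (delta c).1 = 0 := congrArg Prod.fst h0
        have h2 : y + (delta c).2 = 0 := congrArg Prod.snd h0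
        simp [h1, h2]
      · have : ¬ (x + (delta c).1 = 0 ∧ y + (delta c).2 = 0) := by
          intro ⟨a, b⟩; exact h0 (by simp [a, b])
        simp [h0, this]

theorem run_append_one (p : Int × Int) (l : List Char) (c : Char) :
    run p (l ++ [c]) = ((run p l).1 + (delta c).1, (run p l).2 + (delta c).2) := by
  simp [run, List.foldl_append]

theorem lh_append_one : ∀ (l : List Char) (p : Int × Int) (k : Nat) (c : Char),
    lh (l ++ [c]) p k =
      (if run p (l ++ [c]) = (0, 0) then some (k + l.length + 1) else lh l p k) := by
  intro l
  induction l with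
  | nil =>
    intro p k c
    simp [lh, run]
  | cons d l' ih =>
    intro p k c
    have hrun : run p (d :: l' ++ [c]) = run (p.1 + (delta d).1, p.2 + (delta d).2) (l' ++ [c]) := by
      simp [run, List.foldl_cons]
    show lh (d :: (l' ++ [c])) p k = _
    rw [lh, ih]
    by_cases h0 : run (p.1 + (delta d).1, p.2 + (delta d).2) (l' ++ [c]) = ((0 : Int), (0 : Int))
    · simp only [h0]
      rw [show run p (d :: l' ++ [c]) = _ from hrun, if_pos h0]
      simp [List.length_cons]
      omega
    · simp only [h0]
      rw [show run p (d :: l' ++ [c]) = _ from hrun, if_neg h0]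
      rfl

theorem goB_lh : ∀ (r : List Char) (x y : Int),
    (x, y) = run (0, 0) r.reverse →
    goB r x y = (match lh r.reverse (0, 0) 0 with | some m => (m : Int) | none => 0) := by
  intro r
  induction r with
  | nil => intro x y _; simp [goB, lh]
  | cons c rest ih =>
    intro x y h
    have hrev : (c :: rest).reverse = rest.reverse ++ [c] := by simp
    rw [hrev] at h ⊢
    rw [lh_append_one]
    rw [goB]
    by_cases h0 : (x = 0 ∧ y = 0)
    · have : run (0, 0) (rest.reverse ++ [c]) = ((0 : Int), (0 : Int)) := by
        rw [← h]; simp [h0.1, h0.2]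
      simp [h0, this]
    · have hne : run ((0 : Int), (0 : Int)) (rest.reverse ++ [c]) ≠ ((0 : Int), (0 : Int)) := by
        rw [← h]
        intro hc
        exact h0 ⟨congrArg Prod.fst hc, congrArg Prod.snd hc⟩
      rw [if_neg hne, if_neg h0]
      apply ih
      have := run_append_one ((0 : Int), (0 : Int)) rest.reverse c
      rw [← h] at this
      have h1 : x = (run (0, 0) rest.reverse).1 + (delta c).1 := congrArg Prod.fst this
      have h2 : y = (run (0, 0) rest.reverse).2 + (delta c).2 := congrArg Prod.snd this
      rw [h1, h2]
      simp

-- ===== VERDICT (by name: the statement is the Claim_ definition above) =====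
theorem ejecutar_spec : Claim_equal_ejecutar := by
  intro s _
  unfold Spec_ejecutar ejecutar ejecutar_alt
  rw [loopA_lh]
  rw [goB_lh s.toList.reverse _ _ (by simp [run])]
  simp
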